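-- pv_equiv track=rewrite | github.com/PrathikshaSathish26/SECURIN--DOOMEDDICE | python codes/reconstructed.py | combinations_a
-- ===== SOURCE A (Python) =====
-- def combinations_a(arr, sides):
--     result = []
--     n = len(arr)
--     for i in range(int(n ** sides)):
--         temp = []
--         t = i
--         for j in range(sides):
--             index = t % n
--             temp.append(arr[index])
--             t //= n
--         result.append(temp)
--     return result
-- ===== SOURCE B (Python) =====
-- def combinations_a(arr, sides):
--     # Build the Cartesian product incrementally: each round appends one more
--     # position (the new, slowest-varying digit) to every partial tuple.
--     result = [[]]
--     for _ in range(sides):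
--         result = [r + [v] for v in arr for r in result]
--     return result
-- ===== Notes on version B (the rewrite author's own statement) =====
-- stated objective: alternative
-- what changed: B builds the product incrementally (result starts as [[]] and each of the sides rounds appends every arr value to every partial tuple) instead of decoding each index i in range(n**sides) into base-n digits with % and //.
-- outside the precondition, e.g. on combinations_a([1, 2], -1): A returns [], B returns [[]]; on combinations_a([], -1): A raises ZeroDivisionError, B returns [[]]
import Mathlib
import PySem

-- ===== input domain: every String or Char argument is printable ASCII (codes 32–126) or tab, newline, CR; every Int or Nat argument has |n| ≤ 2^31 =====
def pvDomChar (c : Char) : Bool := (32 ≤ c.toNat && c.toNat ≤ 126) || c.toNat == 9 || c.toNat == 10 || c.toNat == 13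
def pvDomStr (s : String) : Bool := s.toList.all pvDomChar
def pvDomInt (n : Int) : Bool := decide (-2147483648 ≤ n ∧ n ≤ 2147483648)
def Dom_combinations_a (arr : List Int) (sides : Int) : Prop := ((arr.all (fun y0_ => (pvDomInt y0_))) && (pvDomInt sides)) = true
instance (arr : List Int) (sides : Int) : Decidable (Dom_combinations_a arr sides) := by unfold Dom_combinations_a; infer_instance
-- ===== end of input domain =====

-- B enumerates the Cartesian product incrementally (each round appends every arr value to every
-- partial tuple) instead of A's base-n digit decoding of each index; objective: alternative algorithm.

-- ===== PORT A =====
-- Port of A. 'int(n ** sides)' is exact integer power (n:Int)^sides.toNat for sides ≥ 0 (= Pre_);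
-- inside the inner loop n > 0 and t % n is in range, so pyGetD's default 0 is never used.
def combinations_a (arr : List Int) (sides : Int) : List (List Int) :=
  let n : Int := PySem.List.len arr
  (PySem.List.pyRange 0 (n ^ sides.toNat) 1).foldl (fun result i =>
    let st := (PySem.List.pyRange 0 sides 1).foldl
      (fun (st : List Int × Int) _j =>
        (st.1 ++ [PySem.List.pyGetD arr (PySem.Int.mod st.2 n) 0], PySem.Int.floordiv st.2 n))
      (([] : List Int), i)
    result ++ [st.1]) []

-- ===== PORT B =====
def combinations_a_alt (arr : List Int) (sides : Int) : List (List Int) :=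
  (PySem.List.pyRange 0 sides 1).foldl
    (fun result _ => arr.flatMap (fun v => result.map (fun r => r ++ [v])))
    [[]]

-- ===== PRECONDITION & SPEC =====
-- Pre_ excludes negative 'sides', outside the function's natural domain: there A raises
-- ZeroDivisionError for empty arr, and otherwise returns [] or [[]] as an accident of the
-- float value of n ** sides being truncated by int(), while B naturally returns [[]].
def Pre_combinations_a (arr : List Int) (sides : Int) : Prop := 0 ≤ sides
instance (arr : List Int) (sides : Int) : Decidable (Pre_combinations_a arr sides) := by unfold Pre_combinations_a; infer_instance
def pvWitness_combinations_a : List Int × Int := ([1, 2], 2)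

def Spec_combinations_a (arr : List Int) (sides : Int) (out : List (List Int)) : Prop := out = combinations_a_alt arr sides
instance (arr : List Int) (sides : Int) (out : List (List Int)) : Decidable (Spec_combinations_a arr sides out) := by unfold Spec_combinations_a; infer_instance

-- ===== CLAIM (what is proved, stated in full; the proofs are below) =====
def Claim_equal_combinations_a : Prop := ∀ (arr : List Int) (sides : Int), Dom_combinations_a arr sides → Pre_combinations_a arr sides → Spec_combinations_a arr sides (combinations_a arr sides)

-- ===== LEMMAS AND PROOFS =====

-- the tuple A's inner loop builds from index t with k digits (little-endian, base n = arr.length)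
def pvDigits (arr : List Int) : Nat → Nat → List Int
  | 0, _ => []
  | k + 1, t => arr.getD (t % arr.length) 0 :: pvDigits arr k (t / arr.length)

lemma pvDigits_succ_right (arr : List Int) (k t : Nat) :
    pvDigits arr (k + 1) t =
      pvDigits arr k t ++ [arr.getD (t / arr.length ^ k % arr.length) 0] := by
  induction k generalizing t with
  | zero => simp [pvDigits]
  | succ k ih =>
      rw [pvDigits, ih, pvDigits]
      simp [Nat.div_div_eq_div_mul, pow_succ, mul_comm]

lemma pvDigits_mod (arr : List Int) (k : Nat) (v i0 : Nat) (h : arr ≠ []) :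
    pvDigits arr k (v * arr.length ^ k + i0) = pvDigits arr k i0 := by
  have hn : 0 < arr.length := List.length_pos_iff.mpr h
  induction k generalizing v i0 with
  | zero => simp [pvDigits]
  | succ k ih =>
      rw [pvDigits, pvDigits]
      have he : v * arr.length ^ (k + 1) + i0 = arr.length * (v * arr.length ^ k) + i0 := by ring
      have h1 : (v * arr.length ^ (k + 1) + i0) % arr.length = i0 % arr.length := by
        rw [he, Nat.mul_add_mod]
      have h2 : (v * arr.length ^ (k + 1) + i0) / arr.length = v * arr.length ^ k + i0 / arr.length := by
        rw [he, Nat.mul_add_div hn]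
      rw [h1, h2, ih]

-- A's inner loop, characterised: k steps from (acc, t) append the k digits and divide t by n^k
lemma pvInner (arr : List Int) (k t : Nat) (acc : List Int) :
    (PySem.List.pyRange 0 (k : Int) 1).foldl
      (fun (st : List Int × Int) _j =>
        (st.1 ++ [PySem.List.pyGetD arr (PySem.Int.mod st.2 (PySem.List.len arr)) 0],
         PySem.Int.floordiv st.2 (PySem.List.len arr)))
      (acc, (t : Int))
    = (acc ++ pvDigits arr k t, ((t / arr.length ^ k : Nat) : Int)) := by
  induction k generalizing t acc with
  | zero => simp [pvDigits]
  | succ k ih =>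
      have : ((k : Int) + 1) = ((k + 1 : Nat) : Int) := by push_cast; ring
      rw [← this, PySem.List.pyRange_one_succ_right (by positivity), List.foldl_append, ih]
      simp only [List.foldl_cons, List.foldl_nil, PySem.List.len_eq,
        PySem.Int.mod_natCast, PySem.Int.floordiv_natCast, PySem.List.pyGetD_natCast]
      rw [pvDigits_succ_right]
      simp [Nat.div_div_eq_div_mul, pow_succ, List.append_assoc]

-- A's result at a nonnegative exponent, in closed form
lemma pvA_eq (arr : List Int) (k : Nat) :
    combinations_a arr (k : Int) = (List.range (arr.length ^ k)).map (pvDigits arr k) := by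
  unfold combinations_a
  simp only [Int.toNat_natCast]
  have hr : (PySem.List.len arr) ^ k = ((arr.length ^ k : Nat) : Int) := by
    simp [PySem.List.len_eq]
  rw [hr, PySem.List.pyRange_zero_nat (arr.length ^ k), List.foldl_map,
    PySem.List.foldl_append_singleton_eq_map, List.nil_append]
  refine List.map_congr_left (fun t _ => ?_)
  have := pvInner arr k t []
  simp only [List.nil_append] at this
  simp only [this]

lemma pvRange_mul (a b : Nat) :
    List.range (a * b) = (List.range a).flatMap (fun v => (List.range b).map (fun i => v * b + i)) := by
  induction a with
  | zero => simp
  | succ a ih =>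
      rw [Nat.succ_mul, List.range_add, ih, List.range_succ, List.flatMap_append]
      simp

lemma pvFlatMap_getD (arr : List Int) (f : Int → List (List Int)) :
    arr.flatMap f = (List.range arr.length).flatMap (fun v => f (arr.getD v 0)) := by
  induction arr with
  | nil => simp
  | cons x xs ih =>
      rw [List.flatMap_cons, List.length_cons, List.range_succ_eq_map, List.flatMap_cons]
      simp only [List.getD_cons_zero, List.flatMap_map, List.getD_cons_succ]
      rw [ih]

-- one round of B maps the k-digit closed form to the (k+1)-digit closed form
lemma pvStep (arr : List Int) (k : Nat) :
    arr.flatMap (fun v => ((List.range (arr.length ^ k)).map (pvDigits arr k)).map (fun r => r ++ [v]))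
    = (List.range (arr.length ^ (k + 1))).map (pvDigits arr (k + 1)) := by
  by_cases h : arr = []
  · subst h; simp [Nat.zero_pow (Nat.succ_pos k)]
  · have hn : 0 < arr.length := List.length_pos_iff.mpr h
    rw [pvFlatMap_getD, pow_succ', pvRange_mul, List.map_flatMap]
    refine List.flatMap_congr (fun v hv => ?_)
    simp only [List.mem_range] at hv
    rw [List.map_map, List.map_map]
    refine List.map_congr_left (fun i0 hi0 => ?_)
    simp only [List.mem_range] at hi0
    simp only [Function.comp]
    rw [pvDigits_succ_right, pvDigits_mod arr k v i0 h]
    have hdiv : (v * arr.length ^ k + i0) / arr.length ^ k = v := by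
      rw [mul_comm, Nat.mul_add_div (pow_pos hn k), Nat.div_eq_of_lt hi0, Nat.add_zero]
    rw [hdiv, Nat.mod_eq_of_lt hv]

lemma pvB_eq (arr : List Int) (k : Nat) :
    combinations_a_alt arr (k : Int) = (List.range (arr.length ^ k)).map (pvDigits arr k) := by
  induction k with
  | zero => simp [combinations_a_alt, pvDigits]
  | succ k ih =>
      unfold combinations_a_alt at ih ⊢
      have : ((k + 1 : Nat) : Int) = (k : Int) + 1 := by push_cast; ring
      rw [this, PySem.List.pyRange_one_succ_right (by positivity), List.foldl_append, ih]
      simp only [List.foldl_cons, List.foldl_nil]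
      exact pvStep arr k

-- ===== VERDICT (by name: the statement is the Claim_ definition above) =====
theorem combinations_a_spec : Claim_equal_combinations_a := by
  intro arr sides _hD hP
  unfold Spec_combinations_a
  obtain ⟨k, rfl⟩ : ∃ k : Nat, sides = (k : Int) := ⟨sides.toNat, (Int.toNat_of_nonneg hP).symm⟩
  rw [pvA_eq, pvB_eq]
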